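-- pv_equiv track=rewrite | github.com/terminus-labs-ai/glyph | glyph/chunkers/_parsers/gdscript_parser.py | _extract_top_doc
-- ===== SOURCE A (Python) =====
-- def _extract_top_doc(lines: list[str]) -> str:
--     """Extract doc comments (##) from the top of the file."""
--     doc_lines = []
--     for line in lines:
--         stripped = line.strip()
--         if stripped.startswith("##"):
--             doc_lines.append(stripped[2:].strip())
--         elif stripped.startswith("#") or not stripped:
--             continue  # skip regular comments and blank lines at top
--         else:
--             break
--     return "\n".join(doc_lines)
-- ===== SOURCE B (Python) =====
-- def _extract_top_doc(lines: list[str]) -> str: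
--     """Extract doc comments (##) from the top of the file."""
--     # pass 1: boundary of the leading comment/blank region
--     n = 0
--     while n < len(lines) and (lines[n].strip().startswith("#") or not lines[n].strip()):
--         n += 1
--     # pass 2: pull the ## doc lines out of that region
--     return "\n".join(
--         l.strip()[2:].strip() for l in lines[:n] if l.strip().startswith("##")
--     )
-- ===== Notes on version B (the rewrite author's own statement) =====
-- stated objective: simpler
-- what changed: A's single fused loop-with-break is split into two passes: a takewhile-style scan that finds the end of the leading comment/blank region, then a comprehension that extracts the '##' doc lines from that prefix.
import Mathlib
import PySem

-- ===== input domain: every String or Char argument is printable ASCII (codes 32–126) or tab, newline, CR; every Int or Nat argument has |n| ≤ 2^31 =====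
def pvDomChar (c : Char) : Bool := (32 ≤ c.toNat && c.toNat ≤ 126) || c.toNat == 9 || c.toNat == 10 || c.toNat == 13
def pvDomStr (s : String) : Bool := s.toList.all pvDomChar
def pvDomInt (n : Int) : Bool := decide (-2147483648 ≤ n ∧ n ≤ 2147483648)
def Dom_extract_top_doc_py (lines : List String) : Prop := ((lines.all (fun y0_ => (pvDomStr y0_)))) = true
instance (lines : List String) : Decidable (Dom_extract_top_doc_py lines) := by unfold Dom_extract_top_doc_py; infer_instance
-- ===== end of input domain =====

-- B replaces A's fused loop-with-break by two passes (boundary scan, then extraction) for a plainer decomposition; same cost.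


-- ===== PORT A =====
-- A's loop: collect doc lines, skip comments/blanks, break at the first code line.
def goA_extract : List String → List String
  | [] => []
  | l :: rest =>
    let stripped := PySem.Str.strip l
    if PySem.Str.startswith stripped "##" then
      PySem.Str.strip (PySem.Str.slice stripped (some 2) none) :: goA_extract rest
    else if PySem.Str.startswith stripped "#" || stripped == "" then
      goA_extract rest
    else []

def extract_top_doc_py (lines : List String) : String :=
  PySem.Str.join "\n" (goA_extract lines)

-- ===== PORT B =====
-- the while-scan's predicate: line is a comment or blank
def topPred (l : String) : Bool :=
  let s := PySem.Str.strip l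
  PySem.Str.startswith s "#" || s == ""

-- the comprehension's per-line extractor
def extractDoc? (l : String) : Option String :=
  let s := PySem.Str.strip l
  if PySem.Str.startswith s "##" then
    some (PySem.Str.strip (PySem.Str.slice s (some 2) none))
  else none

def extract_top_doc_py_alt (lines : List String) : String :=
  let top := lines.takeWhile topPred
  PySem.Str.join "\n" (top.filterMap extractDoc?)

-- ===== PRECONDITION & SPEC =====
def Spec_extract_top_doc_py (lines : List String) (out : String) : Prop := out = extract_top_doc_py_alt lines
instance (lines : List String) (out : String) : Decidable (Spec_extract_top_doc_py lines out) := by unfold Spec_extract_top_doc_py; infer_instance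

-- ===== CLAIM (what is proved, stated in full; the proofs are below) =====
def Claim_equal_extract_top_doc_py : Prop := ∀ (lines : List String), Dom_extract_top_doc_py lines → Spec_extract_top_doc_py lines (extract_top_doc_py lines)

-- ===== LEMMAS AND PROOFS =====
theorem startswith_hashhash_hash (s : String)
    (h : PySem.Str.startswith s "##" = true) : PySem.Str.startswith s "#" = true := by
  simp only [PySem.Str.startswith_eq] at *
  simp [PySem.Chars.startswith] at h ⊢
  exact List.IsPrefix.trans (by decide) h

theorem goA_eq_filterMap_takeWhile (xs : List String) :
    goA_extract xs = (xs.takeWhile topPred).filterMap extractDoc? := by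
  induction xs with
  | nil => rfl
  | cons l rest ih =>
    simp only [goA_extract, List.takeWhile_cons]
    by_cases h2 : PySem.Str.startswith (PySem.Str.strip l) "##" = true
    · have hp : topPred l = true := by
        simp only [topPred]
        rw [startswith_hashhash_hash _ h2]
        simp
      simp only [h2, hp, if_true, List.filterMap_cons, extractDoc?, ih]
    · by_cases h1 : (PySem.Str.startswith (PySem.Str.strip l) "#" || PySem.Str.strip l == "") = true
      · have hp : topPred l = true := by simpa [topPred] using h1
        simp only [h2, h1, hp, if_true, Bool.false_eq_true, if_false, List.filterMap_cons,
          extractDoc?, ih]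
      · have hp : topPred l = false := by
          simp only [topPred]
          simpa using h1
        simp only [h2, h1, hp, Bool.false_eq_true, if_false, List.filterMap_nil]

-- ===== VERDICT (by name: the statement is the Claim_ definition above) =====
theorem extract_top_doc_py_spec : Claim_equal_extract_top_doc_py := by
  intro lines _
  unfold Spec_extract_top_doc_py extract_top_doc_py extract_top_doc_py_alt
  rw [goA_eq_filterMap_takeWhile]
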